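-- pv_equiv track=rewrite | github.com/Mewski/mewski-ctf | challenges/heroctf-v7/spring-drive/solve.py | find_collision_email
-- ===== SOURCE A (Python) =====
-- def java_string_hash(s):
--     """
--     Compute Java's String.hashCode()
--
--     Java implementation:
--         public int hashCode() {
--             int h = 0;
--             for (int i = 0; i < value.length; i++) {
--                 h = 31 * h + value[i];
--             }
--             return h;
--         }
--     """
--     h = 0
--     for c in s:
--         h = (31 * h + ord(c)) & 0xFFFFFFFF
--     # Convert to signed 32-bit integer (Java's int is signed)
--     if h >= 0x80000000:
--         h -= 0x100000000
--     return h
--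
-- def find_collision_email(user_id):
--     """
--     Find an email with hash that creates collision for given user_id.
--
--     Token format: UUID|userId
--     Token hash: token.hashCode() + email.hashCode()
--
--     When we forge token from |X to |1:
--     - Original: UUID|X  -> hash changes by the difference in "|X" vs "|1"
--     - The hash difference is approximately -(userId - 1) for small userIds
--
--     To compensate, we need:
--         our_email.hash = admin@example.com.hash - (userId - 1)
--
--     We search for emails like "admin@example.coX" or "admin@example.coXY"
--     """
--     admin_hash = java_string_hash("admin@example.com")
--     target_hash = admin_hash - (user_id - 1)
--
--     # Try single character suffix
--     base = "admin@example.co"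
--     for c in range(32, 127):
--         test_email = base + chr(c)
--         if java_string_hash(test_email) == target_hash:
--             return test_email
--
--     # Try two character suffix if single char doesn't work
--     for c1 in range(32, 127):
--         for c2 in range(32, 127):
--             test_email = base + chr(c1) + chr(c2)
--             if java_string_hash(test_email) == target_hash:
--                 return test_email
--
--     return None
-- ===== SOURCE B (Python) =====
-- # B: instead of brute-forcing all suffixes, solve the hash congruence algebraically:
-- # the last character is determined mod 2^32, so only the outer character is iterated.
-- M = 1 << 32
--
--
-- def _jhash(s):
--     h = 0
--     for c in s:
--         h = (31 * h + ord(c)) % M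
--     return h - M if h >= M // 2 else h
--
--
-- def find_collision_email(user_id):
--     base = "admin@example.co"
--     target = _jhash("admin@example.com") - (user_id - 1)
--     h = 0
--     for c in base:
--         h = (31 * h + ord(c)) % M
--     # single-character suffix: the character is determined modulo 2^32
--     c0 = (target - 31 * h) % M
--     if 32 <= c0 <= 126 and _jhash(base + chr(c0)) == target:
--         return base + chr(c0)
--     # two-character suffix: iterate the first char, the second is determined
--     for c1 in range(32, 127):
--         h1 = (31 * h + c1) % M
--         c2 = (target - 31 * h1) % M
--         if 32 <= c2 <= 126 and _jhash(base + chr(c1) + chr(c2)) == target: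
--             return base + chr(c1) + chr(c2)
--     return None
-- ===== Notes on version B (the rewrite author's own statement) =====
-- stated objective: faster
-- what changed: Instead of brute-forcing every printable one- and two-character suffix and hashing each candidate email, B precomputes the base prefix's raw hash once and solves the hash congruence algebraically: the last suffix character is uniquely determined modulo the hash word size, so B tests a single one-character candidate and iterates only the outer character of two-character suffixes, verifying each computed candidate with one hash.
import Mathlib
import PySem

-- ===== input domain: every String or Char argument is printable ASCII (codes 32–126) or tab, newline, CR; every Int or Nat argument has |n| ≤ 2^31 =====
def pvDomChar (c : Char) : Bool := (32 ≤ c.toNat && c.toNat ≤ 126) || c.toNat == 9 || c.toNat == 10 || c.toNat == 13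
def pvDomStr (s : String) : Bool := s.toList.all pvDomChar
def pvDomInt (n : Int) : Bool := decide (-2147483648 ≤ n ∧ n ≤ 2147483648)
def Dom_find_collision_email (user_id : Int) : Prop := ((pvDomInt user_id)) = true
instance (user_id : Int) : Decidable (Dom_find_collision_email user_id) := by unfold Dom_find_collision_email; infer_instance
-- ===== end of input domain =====

-- B replaces A's brute-force scan over all 1- and 2-char suffixes by solving the hash
-- congruence for the last character algebraically (objective: faster by a constant factor).


-- ===== PORT A =====
-- h = (31 * h + ord(c)) & 0xFFFFFFFF, folded over the characters
def javaHashLoop (h : Int) (cs : List Char) : Int :=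
  match cs with
  | [] => h
  | c :: rest => javaHashLoop (PySem.Int.band (31 * h + (c.toNat : Int)) 0xFFFFFFFF) rest

def java_string_hash (s : String) : Int :=
  let h := javaHashLoop 0 s.toList
  if h ≥ 0x80000000 then h - 0x100000000 else h

-- for c in range(32, 127): test base + chr(c)
def findLoop1 (target : Int) (cs : List Int) : Option String :=
  match cs with
  | [] => none
  | c :: rest =>
    let test_email := String.ofList ("admin@example.co".toList ++ [Char.ofNat c.toNat])
    if java_string_hash test_email = target then some test_email else findLoop1 target rest

-- inner loop: for c2 in range(32, 127): test base + chr(c1) + chr(c2)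
def findLoop2Inner (target : Int) (c1 : Int) (cs : List Int) : Option String :=
  match cs with
  | [] => none
  | c2 :: rest =>
    let test_email := String.ofList ("admin@example.co".toList ++ [Char.ofNat c1.toNat, Char.ofNat c2.toNat])
    if java_string_hash test_email = target then some test_email else findLoop2Inner target c1 rest

-- outer loop: for c1 in range(32, 127)
def findLoop2 (target : Int) (cs : List Int) : Option String :=
  match cs with
  | [] => none
  | c1 :: rest =>
    match findLoop2Inner target c1 (PySem.List.pyRange 32 127 1) with
    | some e => some e
    | none => findLoop2 target rest

def find_collision_email (user_id : Int) : Option String :=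
  let admin_hash := java_string_hash "admin@example.com"
  let target_hash := admin_hash - (user_id - 1)
  match findLoop1 target_hash (PySem.List.pyRange 32 127 1) with
  | some e => some e
  | none => findLoop2 target_hash (PySem.List.pyRange 32 127 1)

-- ===== PORT B =====
-- h = (31 * h + ord(c)) % M, folded over the characters
def jhashAltLoop (h : Int) (cs : List Char) : Int :=
  match cs with
  | [] => h
  | c :: rest => jhashAltLoop (PySem.Int.mod (31 * h + (c.toNat : Int)) 4294967296) rest

def jhashAlt (s : String) : Int :=
  let h := jhashAltLoop 0 s.toList
  if h ≥ PySem.Int.floordiv 4294967296 2 then h - 4294967296 else h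

-- for c1 in range(32, 127): the second character is determined modulo 2^32
def altLoop (target : Int) (h : Int) (cs : List Int) : Option String :=
  match cs with
  | [] => none
  | c1 :: rest =>
    let h1 := PySem.Int.mod (31 * h + c1) 4294967296
    let c2 := PySem.Int.mod (target - 31 * h1) 4294967296
    if 32 ≤ c2 ∧ c2 ≤ 126 ∧
        jhashAlt (String.ofList ("admin@example.co".toList ++ [Char.ofNat c1.toNat, Char.ofNat c2.toNat])) = target
    then some (String.ofList ("admin@example.co".toList ++ [Char.ofNat c1.toNat, Char.ofNat c2.toNat]))
    else altLoop target h rest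

def find_collision_email_alt (user_id : Int) : Option String :=
  let target := jhashAlt "admin@example.com" - (user_id - 1)
  let h := jhashAltLoop 0 "admin@example.co".toList
  let c0 := PySem.Int.mod (target - 31 * h) 4294967296
  if 32 ≤ c0 ∧ c0 ≤ 126 ∧
      jhashAlt (String.ofList ("admin@example.co".toList ++ [Char.ofNat c0.toNat])) = target
  then some (String.ofList ("admin@example.co".toList ++ [Char.ofNat c0.toNat]))
  else altLoop target (jhashAltLoop 0 "admin@example.co".toList) (PySem.List.pyRange 32 127 1)

-- ===== PRECONDITION & SPEC =====
def Spec_find_collision_email (user_id : Int) (out : Option String) : Prop := out = find_collision_email_alt user_id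
instance (user_id : Int) (out : Option String) : Decidable (Spec_find_collision_email user_id out) := by unfold Spec_find_collision_email; infer_instance

-- ===== CLAIM (what is proved, stated in full; the proofs are below) =====
def Claim_equal_find_collision_email : Prop := ∀ (user_id : Int), Dom_find_collision_email user_id → Spec_find_collision_email user_id (find_collision_email user_id)

-- ===== LEMMAS AND PROOFS =====

-- the two hash loops agree (band with 0xFFFFFFFF = mod 2^32 on nonnegative values)
theorem band_eq_mod (x : Int) (hx : 0 ≤ x) :
    PySem.Int.band x 0xFFFFFFFF = PySem.Int.mod x 4294967296 := by
  rw [PySem.Int.band_of_nonneg hx (by norm_num), PySem.Int.mod_eq_emod_of_pos (by norm_num)]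
  have h1 : (0xFFFFFFFF : Int).toNat = 2 ^ 32 - 1 := rfl
  rw [h1, Nat.and_two_pow_sub_one_eq_mod]
  omega

theorem loop_eq (cs : List Char) (h : Int) (hh : 0 ≤ h) :
    javaHashLoop h cs = jhashAltLoop h cs := by
  induction cs generalizing h with
  | nil => rfl
  | cons c rest ih =>
    simp only [javaHashLoop, jhashAltLoop]
    rw [band_eq_mod _ (by positivity)]
    exact ih _ (PySem.Int.mod_nonneg _ (by norm_num))

theorem jhash_eq (s : String) : java_string_hash s = jhashAlt s := by
  simp only [java_string_hash, jhashAlt, loop_eq s.toList 0 le_rfl]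
  norm_num [PySem.Int.floordiv]
  rw [show Int.fdiv 4294967296 2 = 2147483648 from by decide]

theorem loop_append (cs ds : List Char) (h : Int) :
    jhashAltLoop h (cs ++ ds) = jhashAltLoop (jhashAltLoop h cs) ds := by
  induction cs generalizing h with
  | nil => rfl
  | cons c rest ih => simp only [List.cons_append, jhashAltLoop]; exact ih _

-- character round-trip
theorem char_roundtrip (c : Int) (h1 : 32 ≤ c) (h2 : c ≤ 126) :
    ((Char.ofNat c.toNat).toNat : Int) = c := by
  have hv : c.toNat.isValidChar := Or.inl (by omega)
  unfold Char.ofNat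
  rw [dif_pos hv]
  show ((c.toNat : Int)) = c
  omega

-- hash of a prefix-with-one-more-char, in terms of the prefix's raw loop value
theorem hash_push (l : List Char) (c : Int) (h1 : 32 ≤ c) (h2 : c ≤ 126) :
    java_string_hash (String.ofList (l ++ [Char.ofNat c.toNat])) =
      (let x := PySem.Int.mod (31 * jhashAltLoop 0 l + c) 4294967296
       if x ≥ 2147483648 then x - 4294967296 else x) := by
  rw [jhash_eq]
  simp only [jhashAlt, String.toList_ofList, loop_append]
  simp only [jhashAltLoop, char_roundtrip c h1 h2]
  norm_num [PySem.Int.floordiv]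
  rw [show Int.fdiv 4294967296 2 = 2147483648 from by decide]

-- uniqueness: a printable character whose extension hashes to target is the mod-2^32 candidate
theorem uniq (R target c : Int)
    (h1 : 32 ≤ c) (h2 : c ≤ 126)
    (hhash : (let x := PySem.Int.mod (31 * R + c) 4294967296
              if x ≥ 2147483648 then x - 4294967296 else x) = target) :
    c = PySem.Int.mod (target - 31 * R) 4294967296 := by
  rw [PySem.Int.mod_eq_emod_of_pos (by norm_num)] at hhash ⊢
  simp only at hhash
  split_ifs at hhash <;> omega

-- A's one-char scan over any candidate list, when the matching character is unique
theorem findLoop1_eq (target : Int) (cs : List Int) (c0 : Int)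
    (huniq : ∀ c ∈ cs, java_string_hash (String.ofList ("admin@example.co".toList ++ [Char.ofNat c.toNat])) = target → c = c0) :
    findLoop1 target cs =
      (if c0 ∈ cs ∧ java_string_hash (String.ofList ("admin@example.co".toList ++ [Char.ofNat c0.toNat])) = target
       then some (String.ofList ("admin@example.co".toList ++ [Char.ofNat c0.toNat]))
       else none) := by
  induction cs with
  | nil => simp [findLoop1]
  | cons c rest ih =>
    simp only [findLoop1]
    by_cases hc : java_string_hash (String.ofList ("admin@example.co".toList ++ [Char.ofNat c.toNat])) = target
    · have hcc : c = c0 := huniq c (by simp) hc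
      subst hcc
      rw [if_pos hc, if_pos ⟨by simp, hc⟩]
    · rw [if_neg hc, ih (fun d hd h => huniq d (by simp [hd]) h)]
      by_cases he : c0 = c
      · subst he
        rw [if_neg (fun h => hc h.2), if_neg (fun h => hc h.2)]
      · simp only [List.mem_cons, he, false_or]

theorem findLoop2Inner_eq (target c1 : Int) (cs : List Int) (c0 : Int)
    (huniq : ∀ c ∈ cs, java_string_hash (String.ofList ("admin@example.co".toList ++ [Char.ofNat c1.toNat, Char.ofNat c.toNat])) = target → c = c0) :
    findLoop2Inner target c1 cs =
      (if c0 ∈ cs ∧ java_string_hash (String.ofList ("admin@example.co".toList ++ [Char.ofNat c1.toNat, Char.ofNat c0.toNat])) = target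
       then some (String.ofList ("admin@example.co".toList ++ [Char.ofNat c1.toNat, Char.ofNat c0.toNat]))
       else none) := by
  induction cs with
  | nil => simp [findLoop2Inner]
  | cons c rest ih =>
    simp only [findLoop2Inner]
    by_cases hc : java_string_hash (String.ofList ("admin@example.co".toList ++ [Char.ofNat c1.toNat, Char.ofNat c.toNat])) = target
    · have hcc : c = c0 := huniq c (by simp) hc
      subst hcc
      rw [if_pos hc, if_pos ⟨by simp, hc⟩]
    · rw [if_neg hc, ih (fun d hd h => huniq d (by simp [hd]) h)]
      by_cases he : c0 = c
      · subst he
        rw [if_neg (fun h => hc h.2), if_neg (fun h => hc h.2)]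
      · simp only [List.mem_cons, he, false_or]

-- inner scan of A = algebraic candidate of B, for a fixed first character
theorem inner_eq (T c1 : Int) (hc1 : 32 ≤ c1) (hc1' : c1 < 127) :
    findLoop2Inner T c1 (PySem.List.pyRange 32 127 1) =
      (let h1 := PySem.Int.mod (31 * jhashAltLoop 0 "admin@example.co".toList + c1) 4294967296
       let c2 := PySem.Int.mod (T - 31 * h1) 4294967296
       if 32 ≤ c2 ∧ c2 ≤ 126 ∧
           jhashAlt (String.ofList ("admin@example.co".toList ++ [Char.ofNat c1.toNat, Char.ofNat c2.toNat])) = T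
       then some (String.ofList ("admin@example.co".toList ++ [Char.ofNat c1.toNat, Char.ofNat c2.toNat]))
       else none) := by
  simp only []
  have hch1 : jhashAltLoop 0 ("admin@example.co".toList ++ [Char.ofNat c1.toNat]) =
      PySem.Int.mod (31 * jhashAltLoop 0 "admin@example.co".toList + c1) 4294967296 := by
    rw [loop_append]
    simp only [jhashAltLoop, char_roundtrip c1 hc1 (by omega)]
  have hKey : ∀ c, 32 ≤ c → c ≤ 126 →
      java_string_hash (String.ofList ("admin@example.co".toList ++ [Char.ofNat c1.toNat, Char.ofNat c.toNat])) =
      (let x := PySem.Int.mod (31 * (PySem.Int.mod (31 * jhashAltLoop 0 "admin@example.co".toList + c1) 4294967296) + c) 4294967296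
       if x ≥ 2147483648 then x - 4294967296 else x) := by
    intro c ha hb
    have hl : "admin@example.co".toList ++ [Char.ofNat c1.toNat, Char.ofNat c.toNat] =
        ("admin@example.co".toList ++ [Char.ofNat c1.toNat]) ++ [Char.ofNat c.toNat] := by simp
    rw [hl, hash_push _ c ha hb, hch1]
  rw [findLoop2Inner_eq T c1 _ (PySem.Int.mod (T - 31 * (PySem.Int.mod (31 * jhashAltLoop 0 "admin@example.co".toList + c1) 4294967296)) 4294967296)
    (fun c hc hh => by
      have hm := (PySem.List.mem_pyRange_one).mp hc
      rw [hKey c hm.1 (by omega)] at hh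
      exact uniq _ T c hm.1 (by omega) hh)]
  apply if_congr _ rfl rfl
  rw [jhash_eq, PySem.List.mem_pyRange_one]
  constructor
  · rintro ⟨⟨ha, hb⟩, hh⟩; exact ⟨ha, by omega, hh⟩
  · rintro ⟨ha, hb, hh⟩; exact ⟨⟨ha, by omega⟩, hh⟩

-- A's outer two-character loop = B's single loop
theorem loops2_eq (T : Int) (cs : List Int) (hcs : ∀ c ∈ cs, 32 ≤ c ∧ c < 127) :
    findLoop2 T cs = altLoop T (jhashAltLoop 0 "admin@example.co".toList) cs := by
  induction cs with
  | nil => rfl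
  | cons c1 rest ih =>
    have hc1 := hcs c1 (by simp)
    simp only [findLoop2, altLoop]
    rw [inner_eq T c1 hc1.1 hc1.2]
    simp only []
    by_cases hC : 32 ≤ PySem.Int.mod (T - 31 * (PySem.Int.mod (31 * jhashAltLoop 0 "admin@example.co".toList + c1) 4294967296)) 4294967296 ∧
        PySem.Int.mod (T - 31 * (PySem.Int.mod (31 * jhashAltLoop 0 "admin@example.co".toList + c1) 4294967296)) 4294967296 ≤ 126 ∧
        jhashAlt (String.ofList ("admin@example.co".toList ++ [Char.ofNat c1.toNat,
          Char.ofNat (PySem.Int.mod (T - 31 * (PySem.Int.mod (31 * jhashAltLoop 0 "admin@example.co".toList + c1) 4294967296)) 4294967296).toNat])) = T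
    · rw [if_pos hC, if_pos hC]
    · rw [if_neg hC, if_neg hC]
      exact ih (fun c hc => hcs c (by simp [hc]))

-- ===== VERDICT (by name: the statement is the Claim_ definition above) =====
theorem find_collision_email_spec : Claim_equal_find_collision_email := by
  unfold Claim_equal_find_collision_email
  intro user_id _
  unfold Spec_find_collision_email find_collision_email find_collision_email_alt
  simp only [jhash_eq]
  have hKey : ∀ c, 32 ≤ c → c ≤ 126 →
      java_string_hash (String.ofList ("admin@example.co".toList ++ [Char.ofNat c.toNat])) =
      (let x := PySem.Int.mod (31 * jhashAltLoop 0 "admin@example.co".toList + c) 4294967296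
       if x ≥ 2147483648 then x - 4294967296 else x) :=
    fun c ha hb => hash_push _ c ha hb
  have h1 := findLoop1_eq (jhashAlt "admin@example.com" - (user_id - 1)) (PySem.List.pyRange 32 127 1)
      (PySem.Int.mod ((jhashAlt "admin@example.com" - (user_id - 1)) - 31 * jhashAltLoop 0 "admin@example.co".toList) 4294967296)
      (fun c hc hh => by
        have hm := (PySem.List.mem_pyRange_one).mp hc
        rw [hKey c hm.1 (by omega)] at hh
        exact uniq _ _ c hm.1 (by omega) hh)
  rw [h1]
  by_cases hC : 32 ≤ PySem.Int.mod ((jhashAlt "admin@example.com" - (user_id - 1)) - 31 * jhashAltLoop 0 "admin@example.co".toList) 4294967296 ∧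
      PySem.Int.mod ((jhashAlt "admin@example.com" - (user_id - 1)) - 31 * jhashAltLoop 0 "admin@example.co".toList) 4294967296 ≤ 126 ∧
      jhashAlt (String.ofList ("admin@example.co".toList ++
        [Char.ofNat (PySem.Int.mod ((jhashAlt "admin@example.com" - (user_id - 1)) - 31 * jhashAltLoop 0 "admin@example.co".toList) 4294967296).toNat])) =
        jhashAlt "admin@example.com" - (user_id - 1)
  · rw [if_pos ⟨(PySem.List.mem_pyRange_one).mpr ⟨hC.1, by omega⟩, by rw [jhash_eq]; exact hC.2.2⟩, if_pos hC]
  · rw [if_neg (fun hmem => hC ⟨((PySem.List.mem_pyRange_one).mp hmem.1).1,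
        by have := ((PySem.List.mem_pyRange_one).mp hmem.1).2; omega,
        by rw [← jhash_eq]; exact hmem.2⟩), if_neg hC]
    exact loops2_eq _ _ (fun c hc => (PySem.List.mem_pyRange_one).mp hc)
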